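-- pv_equiv track=rewrite | github.com/JoeyBe1/skill-split | examples/plugins/dependency_mapper/main.py | _resolve_anchor
-- ===== SOURCE A (Python) =====
-- from typing import List, Dict, Set, Optional, Tuple
--
-- def _resolve_anchor(anchor: str, sections: Dict[str, Dict]) -> Optional[str]:
--     """Resolve an anchor to a section ID"""
--     # Try exact match first
--     for section_id, section in sections.items():
--         if section["anchor"] == anchor:
--             return section_id
--
--     # Try partial match
--     for section_id, section in sections.items():
--         if anchor in section["anchor"] or section["anchor"] in anchor:
--             return section_id
--
--     return None
-- ===== SOURCE B (Python) =====
-- def _resolve_anchor(anchor, sections):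
--     """Resolve an anchor to a section ID (single pass: exact returns at once,
--     first partial match is remembered as a fallback)."""
--     fallback = None
--     for section_id, section in sections.items():
--         a = section["anchor"]
--         if a == anchor:
--             return section_id
--         if fallback is None and (anchor in a or a in anchor):
--             fallback = section_id
--     return fallback
-- ===== Notes on version B (the rewrite author's own statement) =====
-- stated objective: simpler
-- what changed: Replaces A's two full scans of sections with a single pass that returns immediately on an exact anchor match and remembers the first partial match in a fallback variable returned at the end.
import Mathlib
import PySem

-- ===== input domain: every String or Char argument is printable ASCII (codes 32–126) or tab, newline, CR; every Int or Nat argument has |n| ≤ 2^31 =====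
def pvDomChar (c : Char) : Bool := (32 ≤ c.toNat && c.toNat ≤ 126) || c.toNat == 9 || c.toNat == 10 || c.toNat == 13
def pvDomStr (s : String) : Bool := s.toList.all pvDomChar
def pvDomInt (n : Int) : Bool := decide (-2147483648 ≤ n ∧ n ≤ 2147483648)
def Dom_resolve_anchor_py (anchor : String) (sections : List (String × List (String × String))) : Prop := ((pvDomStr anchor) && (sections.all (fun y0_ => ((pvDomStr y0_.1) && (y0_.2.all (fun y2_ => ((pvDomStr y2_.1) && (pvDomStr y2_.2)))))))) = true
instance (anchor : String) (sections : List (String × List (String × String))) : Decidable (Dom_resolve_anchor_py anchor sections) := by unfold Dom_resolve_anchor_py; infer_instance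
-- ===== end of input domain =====

-- B replaces A's two full scans with a single pass that returns on an exact match and
-- remembers the first partial match as a fallback (objective: simpler).


-- section["anchor"]: first-match lookup in the inner dict (Pre_ guarantees the key is present,
-- so the "" default is never reached on admitted inputs)
def pvAnchorOf (sec : List (String × String)) : String :=
  ((PySem.Dict.mk sec).get? "anchor").getD ""

-- ===== PORT A =====
-- first loop of A: exact match
def pvExactLoop (anchor : String) : List (String × List (String × String)) → Option String
  | [] => none
  | (sid, sec) :: rest =>
    if pvAnchorOf sec = anchor then some sid else pvExactLoop anchor rest

-- second loop of A: partial match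
def pvPartialLoop (anchor : String) : List (String × List (String × String)) → Option String
  | [] => none
  | (sid, sec) :: rest =>
    if PySem.Str.isIn anchor (pvAnchorOf sec) || PySem.Str.isIn (pvAnchorOf sec) anchor
    then some sid else pvPartialLoop anchor rest

def resolve_anchor_py (anchor : String) (sections : List (String × List (String × String))) : Option String :=
  match pvExactLoop anchor sections with
  | some sid => some sid
  | none => pvPartialLoop anchor sections

-- ===== PORT B =====
-- single pass with a fallback accumulator
def pvAltLoop (anchor : String) (fb : Option String) : List (String × List (String × String)) → Option String
  | [] => fb
  | (sid, sec) :: rest =>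
    let a := pvAnchorOf sec
    if a = anchor then some sid
    else if fb = none ∧ (PySem.Str.isIn anchor a || PySem.Str.isIn a anchor)
    then pvAltLoop anchor (some sid) rest
    else pvAltLoop anchor fb rest

def resolve_anchor_py_alt (anchor : String) (sections : List (String × List (String × String))) : Option String :=
  pvAltLoop anchor none sections

-- ===== PRECONDITION & SPEC =====
-- Pre_ excludes (a) sections whose inner dict lacks the "anchor" key, where Python A raises
-- KeyError, and (b) duplicate keys in the outer or an inner association list, which cannot
-- occur in a Python dict at all.
def Pre_resolve_anchor_py (anchor : String) (sections : List (String × List (String × String))) : Prop :=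
  (∀ p ∈ sections, (∃ q ∈ p.2, q.1 = "anchor") ∧ (p.2.map Prod.fst).Nodup) ∧
  (sections.map Prod.fst).Nodup
instance (anchor : String) (sections : List (String × List (String × String))) : Decidable (Pre_resolve_anchor_py anchor sections) := by unfold Pre_resolve_anchor_py; infer_instance

def pvWitness_resolve_anchor_py : String × (List (String × List (String × String))) :=
  ("intro", [("s1", [("anchor", "introduction")]), ("s2", [("anchor", "intro")])])

def Spec_resolve_anchor_py (anchor : String) (sections : List (String × List (String × String))) (out : Option String) : Prop := out = resolve_anchor_py_alt anchor sections
instance (anchor : String) (sections : List (String × List (String × String))) (out : Option String) : Decidable (Spec_resolve_anchor_py anchor sections out) := by unfold Spec_resolve_anchor_py; infer_instance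

-- ===== CLAIM (what is proved, stated in full; the proofs are below) =====
def Claim_equal_resolve_anchor_py : Prop := ∀ (anchor : String) (sections : List (String × List (String × String))), Dom_resolve_anchor_py anchor sections → Pre_resolve_anchor_py anchor sections → Spec_resolve_anchor_py anchor sections (resolve_anchor_py anchor sections)

-- ===== LEMMAS AND PROOFS =====

-- the one-pass loop with fallback fb computes: exact hit if any, else fb if set, else first partial hit
theorem pvAltLoop_eq (anchor : String) :
    ∀ (l : List (String × List (String × String))) (fb : Option String),
      pvAltLoop anchor fb l =
        match pvExactLoop anchor l with
        | some sid => some sid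
        | none => match fb with
          | some x => some x
          | none => pvPartialLoop anchor l := by
  intro l
  induction l with
  | nil => intro fb; cases fb <;> simp [pvAltLoop, pvExactLoop, pvPartialLoop]
  | cons h t ih =>
    intro fb
    obtain ⟨sid, sec⟩ := h
    by_cases hex : pvAnchorOf sec = anchor
    · simp [pvAltLoop, pvExactLoop, hex]
    · simp only [pvAltLoop, pvExactLoop, pvPartialLoop]
      rw [if_neg hex, if_neg hex]
      cases fb with
      | some x =>
        rw [if_neg (by simp), ih (some x)]
      | none =>
        by_cases hp : (PySem.Str.isIn anchor (pvAnchorOf sec) || PySem.Str.isIn (pvAnchorOf sec) anchor) = true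
        · rw [if_pos ⟨rfl, hp⟩, if_pos hp, ih (some sid)]
        · rw [if_neg (fun hc => hp hc.2), if_neg hp, ih none]

-- ===== VERDICT (by name: the statement is the Claim_ definition above) =====
theorem resolve_anchor_py_spec : Claim_equal_resolve_anchor_py := by
  intro anchor sections _ _
  unfold Spec_resolve_anchor_py resolve_anchor_py resolve_anchor_py_alt
  rw [pvAltLoop_eq]
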